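-- pv_equiv track=rewrite | github.com/masudurHimel/python-basics | Exercise 2.py | array_check
-- ===== SOURCE A (Python) =====
-- def array_check(x):
--     i = 0
--     flag = False
--     while i < len(x) - 2:
--         if x[i] == 1:
--             if x[i + 1] == 2:
--                 if x[i + 2] == 3:
--                     flag = True
--                     break
--         i = i + 1
--     return flag
-- ===== SOURCE B (Python) =====
-- def array_check(x):
--     pattern = (1, 2, 3)
--     matched = 0
--     for v in x:
--         if v == pattern[matched]:
--             matched += 1
--             if matched == 3:
--                 return True
--         else:
--             matched = 1 if v == 1 else 0
--     return False
-- ===== Notes on version B (the rewrite author's own statement) =====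
-- stated objective: alternative
-- what changed: Replaces the index-based three-wide look-ahead window scan with a single pass over the elements maintaining a progress counter of how many leading pattern elements are currently matched, resetting on mismatch; no index arithmetic or look-ahead.
import Mathlib
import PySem

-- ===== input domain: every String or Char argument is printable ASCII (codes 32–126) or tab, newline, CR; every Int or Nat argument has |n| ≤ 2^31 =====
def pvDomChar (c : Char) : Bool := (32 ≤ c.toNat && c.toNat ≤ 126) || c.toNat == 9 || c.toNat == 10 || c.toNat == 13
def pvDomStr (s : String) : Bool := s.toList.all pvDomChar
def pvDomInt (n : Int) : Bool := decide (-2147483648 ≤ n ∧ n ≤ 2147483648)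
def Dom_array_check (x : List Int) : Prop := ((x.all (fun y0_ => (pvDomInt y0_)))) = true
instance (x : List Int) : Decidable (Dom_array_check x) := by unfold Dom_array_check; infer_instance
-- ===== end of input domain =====

-- B replaces A's index-based 3-wide look-ahead window with a progress-counter scan over the
-- elements (objective: alternative — no index arithmetic, same O(n) cost).

-- ===== PORT A =====
-- A's while loop: i is Python's int index, always ≥ 0 here, so it is carried as a Nat;
-- the loop guard `i < len(x) - 2` (Int arithmetic) equals `i + 2 < x.length` for Nat i,
-- and under it x[i], x[i+1], x[i+2] are in-range nonnegative indexings, so `x[_]? = some _`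
-- is exact for Python's x[_] == _ comparison.
def array_check_loop (x : List Int) (i : Nat) : Bool :=
  if i + 2 < x.length then
    if x[i]? = some 1 then
      if x[i+1]? = some 2 then
        if x[i+2]? = some 3 then true
        else array_check_loop x (i+1)
      else array_check_loop x (i+1)
    else array_check_loop x (i+1)
  else false
termination_by x.length - i

def array_check (x : List Int) : Bool := array_check_loop x 0

-- ===== PORT B =====
-- matched ∈ {0,1,2}: how many leading elements of pattern = (1,2,3) are currently matched.
def array_check_alt_loop (matched : Nat) : List Int → Bool
  | [] => false
  | v :: rest =>
    if v = ([1, 2, 3] : List Int).getD matched 0 then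
      if matched + 1 = 3 then true
      else array_check_alt_loop (matched + 1) rest
    else array_check_alt_loop (if v = 1 then 1 else 0) rest

def array_check_alt (x : List Int) : Bool := array_check_alt_loop 0 x

-- ===== PRECONDITION & SPEC =====
def Spec_array_check (x : List Int) (out : Bool) : Prop := out = array_check_alt x
instance (x : List Int) (out : Bool) : Decidable (Spec_array_check x out) := by unfold Spec_array_check; infer_instance

-- ===== CLAIM (what is proved, stated in full; the proofs are below) =====
def Claim_equal_array_check : Prop := ∀ (x : List Int), Dom_array_check x → Spec_array_check x (array_check x)

-- ===== LEMMAS AND PROOFS =====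

-- Reference predicate: does the list contain 1,2,3 consecutively?
def pvWin : List Int → Bool
  | a :: b :: c :: t => (a == 1 && b == 2 && c == 3) || pvWin (b :: c :: t)
  | _ => false

-- "next two elements are 2,3"
def pvP2 : List Int → Bool
  | b :: c :: _ => b == 2 && c == 3
  | _ => false

lemma pvWin_cons (v : Int) (l : List Int) :
    pvWin (v :: l) = ((v == 1) && pvP2 l || pvWin l) := by
  match l with
  | [] => simp [pvWin, pvP2]
  | [b] => simp [pvWin, pvP2]
  | b :: c :: t => simp [pvWin, pvP2, Bool.and_assoc]

lemma pvWin_short (l : List Int) (h : l.length ≤ 2) : pvWin l = false := by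
  match l with
  | [] => rfl
  | [a] => rfl
  | [a, b] => rfl
  | a :: b :: c :: t => simp at h

lemma loopA_eq_win (x : List Int) : ∀ (n i : Nat), x.length - i ≤ n →
    array_check_loop x i = pvWin (x.drop i) := by
  intro n
  induction n with
  | zero =>
    intro i h
    rw [array_check_loop]
    have : ¬ (i + 2 < x.length) := by omega
    rw [if_neg this]
    exact (pvWin_short _ (by simp; omega)).symm
  | succ n ih =>
    intro i h
    rw [array_check_loop]
    by_cases hlt : i + 2 < x.length
    · have h0 : i < x.length := by omega
      have h1 : i + 1 < x.length := by omega
      have h2 : i + 2 < x.length := by omega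
      have hd : x.drop i = x[i] :: x[i+1] :: x[i+2] :: x.drop (i+3) := by
        rw [List.drop_eq_getElem_cons h0, List.drop_eq_getElem_cons h1,
            List.drop_eq_getElem_cons h2]
      have ihi : array_check_loop x (i+1) = pvWin (x.drop (i+1)) := ih (i+1) (by omega)
      have hd1 : x.drop (i+1) = x[i+1] :: x[i+2] :: x.drop (i+3) := by
        rw [List.drop_eq_getElem_cons h1, List.drop_eq_getElem_cons h2]
      rw [if_pos hlt, hd, pvWin, ← hd1]
      simp only [List.getElem?_eq_getElem h0, List.getElem?_eq_getElem h1,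
        List.getElem?_eq_getElem h2, Option.some.injEq]
      by_cases e0 : x[i] = 1
      · by_cases e1 : x[i+1] = 2
        · by_cases e2 : x[i+2] = 3
          · simp [e0, e1, e2]
          · simp [e0, e1, e2, ihi]
        · simp [e0, e1, ihi]
      · simp [e0, ihi]
    · rw [if_neg hlt]
      refine (pvWin_short _ (by simp; omega)).symm

lemma loopB_eq_win (l : List Int) :
    array_check_alt_loop 0 l = pvWin l ∧
    array_check_alt_loop 1 l = pvWin (1 :: l) ∧
    array_check_alt_loop 2 l = pvWin (1 :: 2 :: l) := by
  induction l with
  | nil => refine ⟨rfl, ?_, ?_⟩ <;> decide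
  | cons v rest ih =>
    obtain ⟨ih0, ih1, ih2⟩ := ih
    refine ⟨?_, ?_, ?_⟩
    · -- matched = 0 : expects 1
      rw [array_check_alt_loop, pvWin_cons]
      by_cases e : v = 1
      · subst e
        simp only [ih1, pvWin_cons]
        simp [pvP2]
      · have : ¬ (v = ([1,2,3] : List Int).getD 0 0) := by simpa using e
        rw [if_neg this, if_neg e, ih0]
        simp [e, pvP2]
    · -- matched = 1 : expects 2, context "1 already seen"
      rw [array_check_alt_loop]
      by_cases e : v = 2
      · subst e
        simp only [if_pos (by decide : (2:Int) = ([1,2,3] : List Int).getD 1 0)]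
        rw [if_neg (by decide), ih2]
      · have hne : ¬ (v = ([1,2,3] : List Int).getD 1 0) := by simpa using e
        rw [if_neg hne]
        by_cases e1 : v = 1
        · subst e1
          rw [if_pos rfl, ih1]
          rw [pvWin_cons 1 (1 :: rest), pvWin_cons 1 rest]
          cases rest <;> simp [pvP2]
        · rw [if_neg e1, ih0]
          rw [pvWin_cons 1 (v :: rest), pvWin_cons v rest]
          have h2 : (v == 2) = false := by simp [e]
          have h1 : (v == 1) = false := by simp [e1]
          cases rest <;> simp [pvP2, h2, h1]
    · -- matched = 2 : expects 3, context "1,2 already seen"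
      rw [array_check_alt_loop]
      by_cases e : v = 3
      · subst e
        rw [if_pos (by decide), if_pos rfl]
        rw [pvWin_cons 1 (2 :: 3 :: rest)]
        simp [pvP2]
      · have hne : ¬ (v = ([1,2,3] : List Int).getD 2 0) := by simpa using e
        rw [if_neg hne]
        rw [pvWin_cons 1 (2 :: v :: rest), pvWin_cons 2 (v :: rest)]
        by_cases e1 : v = 1
        · subst e1
          rw [if_pos rfl, ih1, pvWin_cons 1 rest]
          simp [pvP2]
        · rw [if_neg e1, ih0, pvWin_cons v rest]
          have h3 : (v == 3) = false := by simp [e]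
          have h1 : (v == 1) = false := by simp [e1]
          cases rest <;> simp [pvP2, h3, h1]

-- ===== VERDICT (by name: the statement is the Claim_ definition above) =====
theorem array_check_spec : Claim_equal_array_check := by
  intro x _
  unfold Spec_array_check array_check array_check_alt
  rw [loopA_eq_win x x.length 0 (by omega), (loopB_eq_win x).1]
  simp
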